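-- pv_equiv track=rewrite | github.com/DanielSebastin/hackathonscraper | database/cleaner.py | clean_event_description
-- ===== SOURCE A (Python) =====
-- def clean_event_description(text: str) -> str:
--     if not text:
--         return ""
--
--     cleaned = text
--     cutoff_phrases = ["Related Links:", "Online FDP |", "Participate in Events"]
--     for phrase in cutoff_phrases:
--         if phrase in cleaned:
--             cleaned = cleaned.split(phrase)[0]
--
--     top_cutoff = "About Event"
--     if top_cutoff in cleaned:
--         cleaned = cleaned.split(top_cutoff)[-1]
--
--     return cleaned.strip()
-- ===== SOURCE B (Python) =====
-- def clean_event_description(text: str) -> str: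
--     if not text:
--         return ""
--
--     cutoffs = ("Related Links:", "Online FDP |", "Participate in Events")
--     marker = "About Event"
--     out = []
--     i = 0
--     n = len(text)
--     # single left-to-right scan: stop at the first cutoff phrase; whenever the
--     # marker is found, restart the accumulator just after it
--     while i < n:
--         if text.startswith(cutoffs, i):
--             break
--         if text.startswith(marker, i):
--             out.clear()
--             i += len(marker)
--         else:
--             out.append(text[i])
--             i += 1
--     return "".join(out).strip()
-- ===== Notes on version B (the rewrite author's own statement) =====
-- stated objective: alternative
-- what changed: Replaces A's staged split()-passes (one per phrase, then a last split on the top marker) by a single left-to-right character scan with an accumulator that stops at the first cutoff-phrase occurrence and resets the accumulator after each marker occurrence, producing the answer in one fused pass with no intermediate split lists.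
import Mathlib
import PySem

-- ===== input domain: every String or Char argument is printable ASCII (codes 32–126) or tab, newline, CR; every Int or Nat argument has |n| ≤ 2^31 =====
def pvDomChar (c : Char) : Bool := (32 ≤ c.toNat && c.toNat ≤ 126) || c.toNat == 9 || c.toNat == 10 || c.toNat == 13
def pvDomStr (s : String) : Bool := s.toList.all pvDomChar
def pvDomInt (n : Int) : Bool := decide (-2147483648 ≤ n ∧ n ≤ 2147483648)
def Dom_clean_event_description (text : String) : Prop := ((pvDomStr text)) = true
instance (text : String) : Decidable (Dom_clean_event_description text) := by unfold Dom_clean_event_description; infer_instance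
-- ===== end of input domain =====

-- B replaces A's staged split()-passes by a single left-to-right scan with an accumulator
-- that stops at the first cutoff phrase and resets after each marker; objective: alternative
-- one-pass algorithm, no speed claim.

-- ===== PORT A =====
-- one iteration of A's 'for phrase in cutoff_phrases' loop body
def cedStep (cleaned phrase : List Char) : List Char :=
  if PySem.Chars.isIn phrase cleaned then
    -- cleaned.split(phrase)[0]; split with a nonempty separator is never empty, so the default is unreachable
    (PySem.List.pyGet? (PySem.Chars.splitOn cleaned phrase) 0).getD []
  else cleaned

def clean_event_description (text : String) : String :=
  if text.toList.isEmpty then "" else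
  let cleaned := List.foldl cedStep text.toList
      ["Related Links:".toList, "Online FDP |".toList, "Participate in Events".toList]
  -- cleaned.split("About Event")[-1]
  let cleaned2 := if PySem.Chars.isIn "About Event".toList cleaned then
      (PySem.List.pyGet? (PySem.Chars.splitOn cleaned "About Event".toList) (-1)).getD []
    else cleaned
  String.ofList (PySem.Chars.strip cleaned2)

-- ===== PORT B =====
-- text.startswith(cutoffs, i), on the suffix starting at i
def altIsCut (l : List Char) : Bool :=
  "Related Links:".toList.isPrefixOf l || "Online FDP |".toList.isPrefixOf l
    || "Participate in Events".toList.isPrefixOf l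

-- the while loop of B: the suffix of the text still to scan, and the reversed accumulator
def altGo : List Char → List Char → List Char
  | [], acc => acc.reverse
  | c :: rest, acc =>
    if altIsCut (c :: rest) then acc.reverse
    else if "About Event".toList.isPrefixOf (c :: rest) then
      altGo ((c :: rest).drop "About Event".toList.length) []
    else altGo rest (c :: acc)
termination_by l _ => l.length
decreasing_by
  · simp
  · simp

def clean_event_description_alt (text : String) : String :=
  if text.toList.isEmpty then "" else
  String.ofList (PySem.Chars.strip (altGo text.toList []))

-- ===== PRECONDITION & SPEC =====
def Spec_clean_event_description (text : String) (out : String) : Prop := out = clean_event_description_alt text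
instance (text : String) (out : String) : Decidable (Spec_clean_event_description text out) := by unfold Spec_clean_event_description; infer_instance

-- ===== CLAIM (what is proved, stated in full; the proofs are below) =====
def Claim_equal_clean_event_description : Prop := ∀ (text : String), Dom_clean_event_description text → Spec_clean_event_description text (clean_event_description text)

-- ===== LEMMAS AND PROOFS =====

-- index of the first occurrence, as a Nat
def fpos (s sub : List Char) : Nat := (PySem.Chars.find s sub).toNat
-- index of the last occurrence (meaningful when sub occurs in s)
def lastOcc (s sub : List Char) : Nat :=
  Nat.findGreatest (fun i => sub.isPrefixOf (s.drop i) = true) s.length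
-- first index at which some cutoff phrase starts (length of l if none)
def cutpos (l : List Char) : Nat :=
  Nat.find (⟨l.length, Or.inr le_rfl⟩ : ∃ i, altIsCut (l.drop i) = true ∨ l.length ≤ i)
-- the next truncation bound of one cedStep pass (see ced_step_take')
def nk (s q : List Char) (k : Nat) : Nat :=
  if PySem.Chars.isIn q s = true ∧ fpos s q + q.length ≤ k then fpos s q else k

lemma ced_occ_bound {s sub : List Char} {i : Nat} (hsub : sub ≠ []) (h : sub <+: s.drop i) :
    i + sub.length ≤ s.length := by
  have hlen := h.length_le
  rw [List.length_drop] at hlen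
  have : i ≤ s.length := by
    by_contra hc
    rw [List.drop_eq_nil_of_le (le_of_lt (Nat.lt_of_not_le hc))] at h
    exact hsub (List.prefix_nil.mp h)
  have hpos : 0 < sub.length := List.length_pos_of_ne_nil hsub
  omega

lemma ced_prefix_drop_take_iff {s sub : List Char} {k i : Nat} (hsub : sub ≠ []) :
    sub <+: (s.take k).drop i ↔ sub <+: s.drop i ∧ i + sub.length ≤ k := by
  rw [List.drop_take, List.prefix_take_iff]
  have hpos : 0 < sub.length := List.length_pos_of_ne_nil hsub
  constructor
  · rintro ⟨h1, h2⟩; exact ⟨h1, by omega⟩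
  · rintro ⟨h1, h2⟩; exact ⟨h1, by omega⟩

lemma ced_isIn_exists {s sub : List Char} :
    PySem.Chars.isIn sub s = true ↔ ∃ i, sub <+: s.drop i :=
  Iff.symm (PySem.Chars.exists_prefix_drop_iff_isIn _ _)

lemma ced_find_eq_of_first {s sub : List Char} {k : Nat}
    (h1 : sub <+: s.drop k) (h2 : ∀ i < k, ¬ sub <+: s.drop i) :
    PySem.Chars.find s sub = (k : Int) := by
  have hin : PySem.Chars.isIn sub s = true := ced_isIn_exists.mpr ⟨k, h1⟩
  have hnn : 0 ≤ PySem.Chars.find s sub :=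
    (PySem.Chars.find_nonneg_iff _ _).mpr ((PySem.Chars.isIn_iff_infix _ _).mp hin)
  obtain ⟨hocc, hmin⟩ := PySem.Chars.find_spec (s := s) (sub := sub) hnn
  have : (PySem.Chars.find s sub).toNat = k := by
    rcases Nat.lt_trichotomy (PySem.Chars.find s sub).toNat k with h | h | h
    · exact absurd hocc (h2 _ h)
    · exact h
    · exact absurd h1 (hmin _ h)
  omega

lemma ced_find_nonneg {s sub : List Char} (h : PySem.Chars.isIn sub s = true) :
    0 ≤ PySem.Chars.find s sub :=
  (PySem.Chars.find_nonneg_iff _ _).mpr ((PySem.Chars.isIn_iff_infix _ _).mp h)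

lemma ced_fpos_spec {s sub : List Char} (h : PySem.Chars.isIn sub s = true) :
    sub <+: s.drop (fpos s sub) ∧ ∀ i < fpos s sub, ¬ sub <+: s.drop i :=
  PySem.Chars.find_spec (ced_find_nonneg h)

lemma ced_isIn_take_iff {s sub : List Char} {k : Nat} (hsub : sub ≠ []) :
    PySem.Chars.isIn sub (s.take k) = true ↔
      PySem.Chars.isIn sub s = true ∧ fpos s sub + sub.length ≤ k := by
  constructor
  · intro h
    obtain ⟨i, hi⟩ := ced_isIn_exists.mp h
    obtain ⟨hocc, hk⟩ := (ced_prefix_drop_take_iff hsub).mp hi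
    have hin : PySem.Chars.isIn sub s = true := ced_isIn_exists.mpr ⟨i, hocc⟩
    obtain ⟨_, hmin⟩ := ced_fpos_spec hin
    have : fpos s sub ≤ i := by
      by_contra hc
      exact hmin i (Nat.lt_of_not_le hc) hocc
    exact ⟨hin, by omega⟩
  · rintro ⟨hin, hk⟩
    obtain ⟨hocc, _⟩ := ced_fpos_spec hin
    exact ced_isIn_exists.mpr ⟨fpos s sub, (ced_prefix_drop_take_iff hsub).mpr ⟨hocc, hk⟩⟩

lemma ced_find_take {s sub : List Char} {k : Nat} (hsub : sub ≠ [])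
    (h : PySem.Chars.isIn sub (s.take k) = true) :
    PySem.Chars.find (s.take k) sub = (fpos s sub : Int) := by
  obtain ⟨hin, hk⟩ := (ced_isIn_take_iff hsub).mp h
  obtain ⟨hocc, hmin⟩ := ced_fpos_spec hin
  apply ced_find_eq_of_first
  · exact (ced_prefix_drop_take_iff hsub).mpr ⟨hocc, hk⟩
  · intro i hi hc
    exact hmin i hi ((ced_prefix_drop_take_iff hsub).mp hc).1

-- splitOn.go always produces acc.reverse followed by at least one block
lemma ced_go_acc (sep : List Char) :
    ∀ (fuel : Nat) (l cur : List Char) (acc : List (List Char)),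
      ∃ r, PySem.Chars.splitOn.go sep fuel l cur acc = acc.reverse ++ r ∧ r ≠ [] := by
  intro fuel
  induction fuel with
  | zero =>
    intro l cur acc
    exact ⟨[cur.reverse ++ l], by rw [PySem.Chars.splitOn.go]; simp, by simp⟩
  | succ fuel ih =>
    intro l cur acc
    cases l with
    | nil =>
      refine ⟨[cur.reverse], ?_, by simp⟩
      rw [PySem.Chars.splitOn.go]
      · simp
      · omega
    | cons c rest =>
      by_cases hpre : sep.isPrefixOf (c :: rest) = true
      · obtain ⟨r, hr, hne⟩ := ih (List.drop sep.length (c :: rest)) [] (cur.reverse :: acc)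
        refine ⟨cur.reverse :: r, ?_, by simp⟩
        rw [PySem.Chars.splitOn.go, if_pos hpre, hr]
        simp
      · obtain ⟨r, hr, hne⟩ := ih rest (c :: cur) acc
        refine ⟨r, ?_, hne⟩
        rw [PySem.Chars.splitOn.go, if_neg hpre]
        exact hr

lemma ced_isIn_nil {sub : List Char} (hsub : sub ≠ []) : PySem.Chars.isIn sub [] = false := by
  rw [PySem.Chars.isIn_eq_false_iff]
  intro h
  exact hsub (List.eq_nil_of_infix_nil h)

lemma ced_isIn_cons {sub : List Char} {c : Char} {rest : List Char} :
    PySem.Chars.isIn sub (c :: rest) = (sub.isPrefixOf (c :: rest) || PySem.Chars.isIn sub rest) := by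
  rw [Bool.eq_iff_iff, Bool.or_eq_true]
  rw [PySem.Chars.isIn_iff_infix, PySem.Chars.isIn_iff_infix, List.infix_cons_iff,
    List.isPrefixOf_iff_prefix]

lemma ced_lastOcc_unique {l sub : List Char} {k : Nat} (hsub : sub ≠ [])
    (h1 : sub <+: l.drop k) (h2 : ∀ i, k < i → ¬ sub <+: l.drop i) :
    lastOcc l sub = k := by
  unfold lastOcc
  have hkl : k ≤ l.length := by
    have := ced_occ_bound hsub h1
    omega
  have hle : k ≤ Nat.findGreatest (fun i => sub.isPrefixOf (l.drop i) = true) l.length :=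
    Nat.le_findGreatest hkl (List.isPrefixOf_iff_prefix.mpr h1)
  rcases Nat.eq_or_lt_of_le hle with h | h
  · omega
  · exfalso
    have hspec := Nat.findGreatest_spec (P := fun i => sub.isPrefixOf (l.drop i) = true)
      (m := k) hkl (List.isPrefixOf_iff_prefix.mpr h1)
    exact h2 _ h (List.isPrefixOf_iff_prefix.mp hspec)

lemma ced_lastOcc_spec {l sub : List Char} (hsub : sub ≠ [])
    (h : PySem.Chars.isIn sub l = true) :
    sub <+: l.drop (lastOcc l sub) ∧ ∀ i, lastOcc l sub < i → ¬ sub <+: l.drop i := by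
  obtain ⟨j, hj⟩ := ced_isIn_exists.mp h
  have hjl : j ≤ l.length := by
    have := ced_occ_bound hsub hj; omega
  constructor
  · exact List.isPrefixOf_iff_prefix.mp
      (Nat.findGreatest_spec (P := fun i => sub.isPrefixOf (l.drop i) = true)
        (m := j) hjl (List.isPrefixOf_iff_prefix.mpr hj))
  · intro i hi hc
    have hil : i ≤ l.length := by
      have := ced_occ_bound hsub hc; omega
    have := Nat.findGreatest_is_greatest (P := fun i => sub.isPrefixOf (l.drop i) = true)
      hi hil
    exact this (List.isPrefixOf_iff_prefix.mpr hc)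

-- borderless separator: occurrences cannot overlap
lemma ced_no_self_overlap {sep l : List Char} {i : Nat} (hsep : sep ≠ [])
    (hb : ∀ j < sep.length, 0 < j → ¬ sep.drop j <+: sep)
    (h0 : sep <+: l) (hi0 : 0 < i) (hil : i < sep.length) (hi : sep <+: l.drop i) : False := by
  obtain ⟨t, ht⟩ := h0
  subst ht
  rw [List.drop_append_of_le_length (by omega)] at hi
  have h2 : sep.drop i <+: sep.drop i ++ t := List.prefix_append _ _
  rcases List.prefix_or_prefix_of_prefix hi h2 with h | h
  · have := h.length_le
    simp at this
    have hpos : 0 < sep.length := List.length_pos_of_ne_nil hsep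
    omega
  · exact hb i hil hi0 h

lemma ced_lastOcc_shift {sep l : List Char} (hsep : sep ≠ [])
    (hb : ∀ j < sep.length, 0 < j → ¬ sep.drop j <+: sep)
    (hpre : sep.isPrefixOf l = true)
    (hin : PySem.Chars.isIn sep (l.drop sep.length) = true) :
    lastOcc l sep = sep.length + lastOcc (l.drop sep.length) sep := by
  obtain ⟨h1, h2⟩ := ced_lastOcc_spec hsep hin
  have h1' : sep <+: l.drop (sep.length + lastOcc (l.drop sep.length) sep) := by
    have h1d := h1
    rw [List.drop_drop] at h1d
    simpa [Nat.add_comm] using h1d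
  apply ced_lastOcc_unique hsep h1'
  intro i hi hc
  rcases Nat.lt_or_ge i sep.length with hlt | hge
  · exact ced_no_self_overlap hsep hb (List.isPrefixOf_iff_prefix.mp hpre) (by omega) hlt hc
  · apply h2 (i - sep.length) (by omega)
    rw [List.drop_drop]
    have heq : sep.length + (i - sep.length) = i := by omega
    rw [heq]
    exact hc

lemma ced_lastOcc_zero {sep l : List Char} (hsep : sep ≠ [])
    (hb : ∀ j < sep.length, 0 < j → ¬ sep.drop j <+: sep)
    (hpre : sep.isPrefixOf l = true)
    (hin : PySem.Chars.isIn sep (l.drop sep.length) = false) :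
    lastOcc l sep = 0 := by
  apply ced_lastOcc_unique hsep (by simpa using List.isPrefixOf_iff_prefix.mp hpre)
  intro i hi hc
  rcases Nat.lt_or_ge i sep.length with hlt | hge
  · exact ced_no_self_overlap hsep hb (List.isPrefixOf_iff_prefix.mp hpre) hi hlt hc
  · rw [PySem.Chars.isIn_eq_false_iff] at hin
    apply hin
    have heq : l.drop i = (l.drop sep.length).drop (i - sep.length) := by
      rw [List.drop_drop]; congr 1; omega
    rw [heq] at hc
    exact hc.isInfix.trans (List.drop_suffix _ _).isInfix

lemma ced_lastOcc_cons {sep : List Char} {c : Char} {rest : List Char} (hsep : sep ≠ [])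
    (_hpre : ¬ sep.isPrefixOf (c :: rest) = true)
    (hin : PySem.Chars.isIn sep rest = true) :
    lastOcc (c :: rest) sep = 1 + lastOcc rest sep := by
  obtain ⟨h1, h2⟩ := ced_lastOcc_spec hsep hin
  apply ced_lastOcc_unique hsep (by simpa [List.drop_succ_cons, Nat.add_comm] using h1)
  intro i hi hc
  cases i with
  | zero => omega
  | succ j =>
    apply h2 j (by omega)
    simpa [List.drop_succ_cons] using hc

lemma ced_go_last {sep : List Char} (hsep : sep ≠ [])
    (hb : ∀ j < sep.length, 0 < j → ¬ sep.drop j <+: sep) :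
    ∀ (fuel : Nat) (l cur : List Char) (acc : List (List Char)), l.length < fuel →
      (PySem.Chars.splitOn.go sep fuel l cur acc).getLastD [] =
        if PySem.Chars.isIn sep l = true then l.drop (lastOcc l sep + sep.length)
        else cur.reverse ++ l := by
  intro fuel
  induction fuel with
  | zero => intro l cur acc h; omega
  | succ fuel ih =>
    intro l cur acc h
    cases l with
    | nil =>
      rw [PySem.Chars.splitOn.go]
      · simp [ced_isIn_nil hsep]
      · omega
    | cons c rest =>
      by_cases hpre : sep.isPrefixOf (c :: rest) = true
      · rw [PySem.Chars.splitOn.go, if_pos hpre]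
        have hlen : (List.drop sep.length (c :: rest)).length < fuel := by
          have hpos : 0 < sep.length := List.length_pos_of_ne_nil hsep
          simp at h ⊢
          omega
        rw [ih _ [] (cur.reverse :: acc) hlen]
        have hin : PySem.Chars.isIn sep (c :: rest) = true := by
          rw [ced_isIn_cons, hpre]; simp
        rw [if_pos hin]
        by_cases hin' : PySem.Chars.isIn sep (List.drop sep.length (c :: rest)) = true
        · rw [if_pos hin']
          rw [ced_lastOcc_shift hsep hb hpre hin']
          rw [List.drop_drop]
          congr 1
          omega
        · rw [if_neg hin']
          rw [ced_lastOcc_zero hsep hb hpre (by simpa using hin')]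
          simp
      · rw [PySem.Chars.splitOn.go, if_neg hpre]
        have hlen : rest.length < fuel := by simp at h; omega
        rw [ih rest (c :: cur) acc hlen]
        by_cases hin : PySem.Chars.isIn sep rest = true
        · have hin' : PySem.Chars.isIn sep (c :: rest) = true := by
            rw [ced_isIn_cons, hin]; simp
          rw [if_pos hin, if_pos hin']
          rw [ced_lastOcc_cons hsep hpre hin]
          have heq : 1 + lastOcc rest sep + sep.length = (lastOcc rest sep + sep.length) + 1 := by
            ring
          rw [heq, List.drop_succ_cons]
        · have hin' : PySem.Chars.isIn sep (c :: rest) = false := by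
            rw [ced_isIn_cons]
            simp only [Bool.or_eq_false_iff]
            exact ⟨Bool.eq_false_iff.mpr hpre, Bool.eq_false_iff.mpr hin⟩
          rw [if_neg (by simp [hin]), if_neg (by simp [hin'])]
          simp

lemma ced_pyGet_neg_one {l : List (List Char)} (h : l ≠ []) :
    (PySem.List.pyGet? l (-1)).getD [] = l.getLastD [] := by
  have hlen : 0 < l.length := List.length_pos_of_ne_nil h
  simp [PySem.List.pyGet?, PySem.List.pyIdx?]
  rw [if_pos (by omega : 1 ≤ l.length)]
  simp
  rw [List.getLast?_eq_getElem?]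

lemma ced_splitOn_last {c sep : List Char} (hsep : sep ≠ [])
    (hb : ∀ j < sep.length, 0 < j → ¬ sep.drop j <+: sep) :
    (PySem.List.pyGet? (PySem.Chars.splitOn c sep) (-1)).getD [] =
      if PySem.Chars.isIn sep c = true then c.drop (lastOcc c sep + sep.length) else c := by
  have hne : PySem.Chars.splitOn c sep ≠ [] := by
    obtain ⟨r, hr, hrne⟩ := ced_go_acc sep (c.length + 1) c [] []
    unfold PySem.Chars.splitOn
    rw [hr]; simpa using hrne
  rw [ced_pyGet_neg_one hne]
  unfold PySem.Chars.splitOn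
  have := ced_go_last hsep hb (c.length + 1) c [] [] (by omega)
  simpa using this

-- head of splitOn (the [0] of A's split), as take of the first occurrence
lemma ced_find_cons_prefix {l sub : List Char} (h : sub.isPrefixOf l = true) :
    PySem.Chars.find l sub = 0 := by
  have := ced_find_eq_of_first (s := l) (k := 0) (by simpa using List.isPrefixOf_iff_prefix.mp h)
    (by intro i hi; omega)
  simpa using this

lemma ced_find_cons_not_prefix {sub : List Char} {c : Char} {rest : List Char}
    (hpre : ¬ sub.isPrefixOf (c :: rest) = true)
    (hin : PySem.Chars.isIn sub rest = true) :
    PySem.Chars.find (c :: rest) sub = 1 + (fpos rest sub : Int) := by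
  obtain ⟨hocc, hmin⟩ := ced_fpos_spec hin
  have h1 : sub <+: (c :: rest).drop (1 + fpos rest sub) := by
    simpa [List.drop_succ_cons, Nat.add_comm] using hocc
  have := ced_find_eq_of_first (s := c :: rest) (k := 1 + fpos rest sub) h1 ?_
  · rw [this]; push_cast; ring
  · intro i hi
    cases i with
    | zero =>
      intro hc
      exact hpre (List.isPrefixOf_iff_prefix.mpr (by simpa using hc))
    | succ j =>
      intro hc
      exact hmin j (by omega) (by simpa [List.drop_succ_cons] using hc)

lemma ced_go_head {sep : List Char} (hsep : sep ≠ []) :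
    ∀ (fuel : Nat) (l cur : List Char), l.length < fuel →
      (PySem.Chars.splitOn.go sep fuel l cur []).headD [] =
        cur.reverse ++ (if PySem.Chars.isIn sep l = true then l.take (fpos l sep) else l) := by
  intro fuel
  induction fuel with
  | zero => intro l cur h; omega
  | succ fuel ih =>
    intro l cur h
    cases l with
    | nil =>
      rw [PySem.Chars.splitOn.go]
      · simp [ced_isIn_nil hsep]
      · omega
    | cons c rest =>
      by_cases hpre : sep.isPrefixOf (c :: rest) = true
      · rw [PySem.Chars.splitOn.go, if_pos hpre]
        obtain ⟨r, hr, hne⟩ := ced_go_acc sep fuel (List.drop sep.length (c :: rest)) [] [cur.reverse]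
        rw [hr]
        have hin : PySem.Chars.isIn sep (c :: rest) = true := by
          rw [ced_isIn_cons, hpre]; simp
        have hf : fpos (c :: rest) sep = 0 := by
          unfold fpos; rw [ced_find_cons_prefix hpre]; rfl
        simp [hin, hf]
      · rw [PySem.Chars.splitOn.go, if_neg hpre]
        have hlen : rest.length < fuel := by simp at h; omega
        rw [ih rest (c :: cur) hlen]
        by_cases hin : PySem.Chars.isIn sep rest = true
        · have hin' : PySem.Chars.isIn sep (c :: rest) = true := by
            rw [ced_isIn_cons, hin]; simp
          have hf : fpos (c :: rest) sep = 1 + fpos rest sep := by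
            have hrec := ced_find_cons_not_prefix hpre hin
            have hnn : (0:Int) ≤ PySem.Chars.find rest sep := ced_find_nonneg hin
            unfold fpos
            rw [hrec]
            unfold fpos
            omega
          simp [hin, hin', hf, List.take_succ_cons, Nat.add_comm]
        · have hin' : PySem.Chars.isIn sep (c :: rest) = false := by
            rw [ced_isIn_cons]
            simp only [Bool.or_eq_false_iff]
            exact ⟨Bool.eq_false_iff.mpr hpre, Bool.eq_false_iff.mpr hin⟩
          simp [hin, hin']

lemma ced_pyGet_zero {l : List (List Char)} (h : l ≠ []) :
    (PySem.List.pyGet? l 0).getD [] = l.headD [] := by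
  cases l with
  | nil => simp at h
  | cons a t => simp [PySem.List.pyGet?, PySem.List.pyIdx?]

lemma ced_splitOn_head {c sep : List Char} (hsep : sep ≠ []) :
    (PySem.List.pyGet? (PySem.Chars.splitOn c sep) 0).getD [] =
      if PySem.Chars.isIn sep c = true then c.take (fpos c sep) else c := by
  have hne : PySem.Chars.splitOn c sep ≠ [] := by
    obtain ⟨r, hr, hrne⟩ := ced_go_acc sep (c.length + 1) c [] []
    unfold PySem.Chars.splitOn
    rw [hr]; simpa using hrne
  rw [ced_pyGet_zero hne]
  unfold PySem.Chars.splitOn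
  have := ced_go_head hsep (c.length + 1) c [] (by omega)
  simpa using this

lemma ced_step_take {s q : List Char} {k : Nat} (hq : q ≠ []) :
    cedStep (s.take k) q =
      s.take (if PySem.Chars.isIn q s = true ∧ fpos s q + q.length ≤ k then fpos s q else k) := by
  unfold cedStep
  by_cases hin : PySem.Chars.isIn q (s.take k) = true
  · obtain ⟨hins, hfk⟩ := (ced_isIn_take_iff hq).mp hin
    rw [if_pos hin, ced_splitOn_head hq, if_pos hin]
    have hft : (PySem.Chars.find (s.take k) q).toNat = fpos s q := by
      rw [ced_find_take hq hin]; simp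
    show (s.take k).take (PySem.Chars.find (s.take k) q).toNat = _
    rw [hft, List.take_take, if_pos ⟨hins, hfk⟩]
    congr 1
    have hq0 : 0 < q.length := List.length_pos_of_ne_nil hq
    omega
  · rw [if_neg hin]
    have : ¬ (PySem.Chars.isIn q s = true ∧ fpos s q + q.length ≤ k) := by
      intro hc
      exact hin ((ced_isIn_take_iff hq).mpr hc)
    rw [if_neg this]

lemma ced_step_take' {s q : List Char} {k : Nat} (hq : q ≠ []) :
    cedStep (s.take k) q = s.take (nk s q k) := ced_step_take hq

lemma nk_le_aux {s q : List Char} {k : Nat} : nk s q k ≤ k := by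
  unfold nk
  split_ifs with h
  · omega
  · exact le_rfl

lemma nk_not_aux {s q : List Char} {k : Nat}
    (hfit : ∀ a, a < k → q <+: s.drop a → a + q.length ≤ k) :
    ∀ i, i < nk s q k → ¬ q <+: s.drop i := by
  intro i hi hocc
  unfold nk at hi
  split_ifs at hi with h
  · exact (ced_fpos_spec h.1).2 i hi hocc
  · have hin : PySem.Chars.isIn q s = true := ced_isIn_exists.mpr ⟨i, hocc⟩
    have hfp_le : fpos s q ≤ i := by
      by_contra hc
      exact (ced_fpos_spec hin).2 i (Nat.lt_of_not_le hc) hocc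
    exact h ⟨hin, hfit (fpos s q) (by omega) (ced_fpos_spec hin).1⟩

lemma nk_at_aux {s q : List Char} {k : Nat} :
    q <+: s.drop (nk s q k) ∨ nk s q k = k := by
  unfold nk
  split_ifs with h
  · exact Or.inl (ced_fpos_spec h.1).1
  · exact Or.inr rfl

-- cross-phrase non-overlap
lemma ced_no_overlap {s r q : List Char} {a b : Nat}
    (hcomp : ∀ j < q.length, 0 < j → ¬ (q.drop j <+: r) ∧ ¬ (r <+: q.drop j))
    (ha : q <+: s.drop a) (hbp : r <+: s.drop b) (hab : a < b) :
    a + q.length ≤ b := by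
  by_contra hcon
  have hc : b < a + q.length := Nat.lt_of_not_le hcon
  obtain ⟨t, ht⟩ := ha
  have hdrop : s.drop b = q.drop (b - a) ++ t := by
    have hd : s.drop b = (s.drop a).drop (b - a) := by
      rw [List.drop_drop]; congr 1; omega
    rw [hd, ← ht, List.drop_append_of_le_length (by omega)]
  rw [hdrop] at hbp
  have h2 : q.drop (b - a) <+: q.drop (b - a) ++ t := List.prefix_append _ _
  have hj1 : 0 < b - a := by omega
  have hj2 : b - a < q.length := by omega
  rcases List.prefix_or_prefix_of_prefix hbp h2 with h | h
  · exact (hcomp (b - a) hj2 hj1).2 h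
  · exact (hcomp (b - a) hj2 hj1).1 h

-- ===== cutpos characterisation =====

lemma ced_cutpos_le (l : List Char) : cutpos l ≤ l.length := Nat.find_le (Or.inr le_rfl)

lemma ced_cutpos_not {l : List Char} {i : Nat} (h : i < cutpos l) :
    altIsCut (l.drop i) = false := by
  unfold cutpos at h
  have h2 := Nat.find_min _ h
  simp only [not_or, not_le, Bool.not_eq_true] at h2
  exact h2.1

lemma ced_cutpos_spec (l : List Char) :
    altIsCut (l.drop (cutpos l)) = true ∨ cutpos l = l.length := by
  have h := Nat.find_spec
    (⟨l.length, Or.inr le_rfl⟩ : ∃ i, altIsCut (l.drop i) = true ∨ l.length ≤ i)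
  have hle := ced_cutpos_le l
  rcases h with h | h
  · exact Or.inl h
  · exact Or.inr (le_antisymm hle h)

lemma ced_cutpos_eq {l : List Char} {K : Nat} (h1 : K ≤ l.length)
    (h2 : ∀ i, i < K → altIsCut (l.drop i) = false)
    (h3 : altIsCut (l.drop K) = true ∨ K = l.length) : cutpos l = K := by
  have hPK : altIsCut (l.drop K) = true ∨ l.length ≤ K := by
    rcases h3 with h | h
    · exact Or.inl h
    · exact Or.inr h.ge
  refine le_antisymm (Nat.find_le hPK) ?_
  by_contra hc
  rw [not_le] at hc
  rcases ced_cutpos_spec l with h | h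
  · rw [h2 _ hc] at h
    exact Bool.false_ne_true h
  · have := ced_cutpos_le l
    omega

lemma ced_altIsCut_iff (l : List Char) : altIsCut l = true ↔
    "Related Links:".toList <+: l ∨ "Online FDP |".toList <+: l
      ∨ "Participate in Events".toList <+: l := by
  simp [altIsCut, List.isPrefixOf_iff_prefix, or_assoc]

-- a cutoff phrase cannot start strictly inside an occurrence of "About Event"
lemma ced_marker_blocks {l : List Char} (hm : "About Event".toList <+: l)
    {i : Nat} (h0 : 0 < i) (hi : i < "About Event".toList.length) :
    altIsCut (l.drop i) = false := by
  by_contra h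
  rw [Bool.not_eq_false] at h
  have hm0 : "About Event".toList <+: l.drop 0 := by simpa using hm
  have hcomp1 : ∀ j < ("About Event".toList : List Char).length, 0 < j →
      ¬ (("About Event".toList : List Char).drop j <+: "Related Links:".toList)
        ∧ ¬ (("Related Links:".toList : List Char) <+: ("About Event".toList : List Char).drop j) := by
    decide
  have hcomp2 : ∀ j < ("About Event".toList : List Char).length, 0 < j →
      ¬ (("About Event".toList : List Char).drop j <+: "Online FDP |".toList)
        ∧ ¬ (("Online FDP |".toList : List Char) <+: ("About Event".toList : List Char).drop j) := by
    decide
  have hcomp3 : ∀ j < ("About Event".toList : List Char).length, 0 < j →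
      ¬ (("About Event".toList : List Char).drop j <+: "Participate in Events".toList)
        ∧ ¬ (("Participate in Events".toList : List Char) <+: ("About Event".toList : List Char).drop j) := by
    decide
  rcases (ced_altIsCut_iff _).mp h with hc | hc | hc
  · have := ced_no_overlap hcomp1 hm0 hc h0; omega
  · have := ced_no_overlap hcomp2 hm0 hc h0; omega
  · have := ced_no_overlap hcomp3 hm0 hc h0; omega

lemma ced_cutpos_zero {l : List Char} (h : altIsCut l = true) : cutpos l = 0 :=
  ced_cutpos_eq (Nat.zero_le _) (fun i hi => absurd hi (Nat.not_lt_zero i))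
    (Or.inl (by simpa using h))

lemma ced_cutpos_cons {c : Char} {rest : List Char} (h : altIsCut (c :: rest) = false) :
    cutpos (c :: rest) = 1 + cutpos rest := by
  apply ced_cutpos_eq
  · have := ced_cutpos_le rest
    simp only [List.length_cons]
    omega
  · intro i hi
    cases i with
    | zero => simpa using h
    | succ j =>
      rw [List.drop_succ_cons]
      exact ced_cutpos_not (by omega)
  · rcases ced_cutpos_spec rest with h' | h'
    · left
      rw [Nat.add_comm, List.drop_succ_cons]
      exact h'
    · right
      simp only [List.length_cons]
      omega

lemma ced_cutpos_skip {l : List Char} (hm : ("About Event".toList).isPrefixOf l = true)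
    (h0 : altIsCut l = false) :
    cutpos l = "About Event".toList.length + cutpos (l.drop "About Event".toList.length) := by
  have hmp := List.isPrefixOf_iff_prefix.mp hm
  have hlen : "About Event".toList.length ≤ l.length := hmp.length_le
  apply ced_cutpos_eq
  · have := ced_cutpos_le (l.drop "About Event".toList.length)
    rw [List.length_drop] at this
    omega
  · intro i hi
    rcases Nat.lt_or_ge i "About Event".toList.length with h | h
    · rcases Nat.eq_zero_or_pos i with rfl | hpos
      · simpa using h0
      · exact ced_marker_blocks hmp hpos h
    · have heq : l.drop i = (l.drop "About Event".toList.length).drop (i - "About Event".toList.length) := by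
        rw [List.drop_drop]; congr 1; omega
      rw [heq]
      exact ced_cutpos_not (by omega)
  · rcases ced_cutpos_spec (l.drop "About Event".toList.length) with h' | h'
    · left
      have hdd : (l.drop "About Event".toList.length).drop
            (cutpos (l.drop "About Event".toList.length))
          = l.drop ("About Event".toList.length + cutpos (l.drop "About Event".toList.length)) := by
        rw [List.drop_drop]
      rw [← hdd]
      exact h'
    · right
      rw [List.length_drop] at h'
      omega

-- ===== the scan altGo computes take-at-cutpos then drop-after-last-marker =====

lemma ced_altGo_spec : ∀ (n : Nat) (l acc : List Char), l.length ≤ n →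
    altGo l acc =
      (if PySem.Chars.isIn "About Event".toList (l.take (cutpos l)) = true then
        (l.take (cutpos l)).drop
          (lastOcc (l.take (cutpos l)) "About Event".toList + "About Event".toList.length)
      else acc.reverse ++ l.take (cutpos l)) := by
  have hsepM : ("About Event".toList : List Char) ≠ [] := by decide
  have hbM : ∀ j < ("About Event".toList : List Char).length, 0 < j →
      ¬ ("About Event".toList : List Char).drop j <+: "About Event".toList := by decide
  intro n
  induction n with
  | zero =>
    intro l acc h
    have hl : l = [] := List.eq_nil_of_length_eq_zero (by omega)
    subst hl
    have hc0 : cutpos ([] : List Char) = 0 := Nat.le_zero.mp (ced_cutpos_le [])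
    rw [altGo, hc0, List.take_nil, ced_isIn_nil hsepM]
    simp
  | succ n ih =>
    intro l acc h
    cases l with
    | nil =>
      have hc0 : cutpos ([] : List Char) = 0 := Nat.le_zero.mp (ced_cutpos_le [])
      rw [altGo, hc0, List.take_nil, ced_isIn_nil hsepM]
      simp
    | cons c rest =>
      rw [altGo]
      by_cases hcut : altIsCut (c :: rest) = true
      · rw [if_pos hcut, ced_cutpos_zero hcut, List.take_zero, ced_isIn_nil hsepM]
        simp
      · rw [if_neg hcut]
        have hcf : altIsCut (c :: rest) = false := Bool.not_eq_true _ |>.mp hcut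
        by_cases hm : ("About Event".toList).isPrefixOf (c :: rest) = true
        · rw [if_pos hm, ced_cutpos_skip hm hcf]
          have hrec := ih ((c :: rest).drop "About Event".toList.length) []
            (by
              rw [List.length_drop]
              have hM1 : 1 ≤ "About Event".toList.length := by decide
              simp only [List.length_cons] at h ⊢
              omega)
          rw [hrec]
          have hmp := List.isPrefixOf_iff_prefix.mp hm
          set M := "About Event".toList.length with hMdef
          set d := (c :: rest).drop M with hddef
          set t := (c :: rest).take (M + cutpos d) with htdef
          set t' := d.take (cutpos d) with ht'def
          have ht' : t.drop M = t' := by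
            rw [htdef, ht'def, hddef, List.drop_take]
            congr 1
            omega
          have hpre_t : ("About Event".toList).isPrefixOf t = true := by
            rw [htdef, List.isPrefixOf_iff_prefix, List.prefix_take_iff]
            refine ⟨hmp, ?_⟩
            rw [hMdef]
            omega
          have hin_t : PySem.Chars.isIn "About Event".toList t = true :=
            ced_isIn_exists.mpr ⟨0, by simpa using List.isPrefixOf_iff_prefix.mp hpre_t⟩
          rw [if_pos hin_t]
          by_cases hin' : PySem.Chars.isIn "About Event".toList t' = true
          · rw [if_pos hin']
            have hsh := ced_lastOcc_shift hsepM hbM hpre_t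
              (by rw [← hMdef, ht']; exact hin')
            rw [← hMdef, ht'] at hsh
            rw [hsh]
            have hdd : t.drop (M + (lastOcc t' "About Event".toList + M))
                = (t.drop M).drop (lastOcc t' "About Event".toList + M) := by
              rw [List.drop_drop]
            rw [Nat.add_assoc, hdd, ht']
          · rw [if_neg hin']
            have hz := ced_lastOcc_zero hsepM hbM hpre_t
              (by rw [← hMdef, ht']; exact (Bool.not_eq_true _).mp hin')
            rw [hz, Nat.zero_add, ht']
            simp
        · rw [if_neg hm, ced_cutpos_cons hcf]
          have hrec := ih rest (c :: acc) (by simp only [List.length_cons] at h; omega)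
          rw [hrec, Nat.add_comm 1 (cutpos rest), List.take_succ_cons]
          have hprefl : (c :: rest.take (cutpos rest)) <+: (c :: rest) :=
            List.cons_prefix_cons.mpr ⟨rfl, List.take_prefix _ _⟩
          have hnp : ¬ ("About Event".toList).isPrefixOf (c :: rest.take (cutpos rest)) = true := by
            intro hc
            exact hm (List.isPrefixOf_iff_prefix.mpr
              ((List.isPrefixOf_iff_prefix.mp hc).trans hprefl))
          have hiff : PySem.Chars.isIn "About Event".toList (c :: rest.take (cutpos rest))
              = PySem.Chars.isIn "About Event".toList (rest.take (cutpos rest)) := by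
            rw [ced_isIn_cons, Bool.eq_false_iff.mpr hnp, Bool.false_or]
          by_cases hin' : PySem.Chars.isIn "About Event".toList (rest.take (cutpos rest)) = true
          · rw [if_pos hin', if_pos (by rw [hiff]; exact hin')]
            rw [ced_lastOcc_cons hsepM hnp hin']
            rw [show 1 + lastOcc (rest.take (cutpos rest)) "About Event".toList
                  + "About Event".toList.length
                = (lastOcc (rest.take (cutpos rest)) "About Event".toList
                  + "About Event".toList.length) + 1 from by omega,
              List.drop_succ_cons]
          · rw [if_neg hin', if_neg (by rw [hiff]; exact hin')]
            simp

-- ===== A's chain of split passes truncates exactly at cutpos =====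

lemma ced_chain (s : List Char) :
    List.foldl cedStep s
        ["Related Links:".toList, "Online FDP |".toList, "Participate in Events".toList]
      = s.take (cutpos s) := by
  have hq1 : ("Related Links:".toList : List Char) ≠ [] := by decide
  have hq2 : ("Online FDP |".toList : List Char) ≠ [] := by decide
  have hq3 : ("Participate in Events".toList : List Char) ≠ [] := by decide
  have hcomp21 : ∀ j < ("Online FDP |".toList : List Char).length, 0 < j →
      ¬ (("Online FDP |".toList : List Char).drop j <+: "Related Links:".toList)
        ∧ ¬ (("Related Links:".toList : List Char) <+: ("Online FDP |".toList : List Char).drop j) := by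
    decide
  have hcomp31 : ∀ j < ("Participate in Events".toList : List Char).length, 0 < j →
      ¬ (("Participate in Events".toList : List Char).drop j <+: "Related Links:".toList)
        ∧ ¬ (("Related Links:".toList : List Char) <+: ("Participate in Events".toList : List Char).drop j) := by
    decide
  have hcomp32 : ∀ j < ("Participate in Events".toList : List Char).length, 0 < j →
      ¬ (("Participate in Events".toList : List Char).drop j <+: "Online FDP |".toList)
        ∧ ¬ (("Online FDP |".toList : List Char) <+: ("Participate in Events".toList : List Char).drop j) := by
    decide
  conv_lhs => rw [show s = s.take s.length from (List.take_length).symm]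
  rw [List.foldl_cons, List.foldl_cons, List.foldl_cons, List.foldl_nil,
      ced_step_take' hq1, ced_step_take' hq2, ced_step_take' hq3]
  congr 1
  set k1 := nk s "Related Links:".toList s.length with hk1
  set k2 := nk s "Online FDP |".toList k1 with hk2
  set k3 := nk s "Participate in Events".toList k2 with hk3
  have h1le : k1 ≤ s.length := by rw [hk1]; exact nk_le_aux
  have h2le : k2 ≤ k1 := by rw [hk2]; exact nk_le_aux
  have h3le : k3 ≤ k2 := by rw [hk3]; exact nk_le_aux
  have fit1 : ∀ a, a < s.length → ("Related Links:".toList : List Char) <+: s.drop a →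
      a + ("Related Links:".toList : List Char).length ≤ s.length :=
    fun a _ hocc => ced_occ_bound hq1 hocc
  have h1not := nk_not_aux (s := s) (q := "Related Links:".toList) (k := s.length) fit1
  rw [← hk1] at h1not
  have h1at := nk_at_aux (s := s) (q := "Related Links:".toList) (k := s.length)
  rw [← hk1] at h1at
  have fit2 : ∀ a, a < k1 → ("Online FDP |".toList : List Char) <+: s.drop a →
      a + ("Online FDP |".toList : List Char).length ≤ k1 := by
    intro a ha hocc
    rcases h1at with hb | hb
    · exact ced_no_overlap hcomp21 hocc hb ha
    · rw [hb] at ha ⊢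
      exact ced_occ_bound hq2 hocc
  have h2not := nk_not_aux (s := s) (q := "Online FDP |".toList) (k := k1) fit2
  rw [← hk2] at h2not
  have h2at := nk_at_aux (s := s) (q := "Online FDP |".toList) (k := k1)
  rw [← hk2] at h2at
  have fit3 : ∀ a, a < k2 → ("Participate in Events".toList : List Char) <+: s.drop a →
      a + ("Participate in Events".toList : List Char).length ≤ k2 := by
    intro a ha hocc
    rcases h2at with hb | hb
    · exact ced_no_overlap hcomp32 hocc hb ha
    · rw [hb] at ha ⊢
      rcases h1at with hb' | hb'
      · exact ced_no_overlap hcomp31 hocc hb' ha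
      · rw [hb'] at ha ⊢
        exact ced_occ_bound hq3 hocc
  have h3not := nk_not_aux (s := s) (q := "Participate in Events".toList) (k := k2) fit3
  rw [← hk3] at h3not
  have h3at := nk_at_aux (s := s) (q := "Participate in Events".toList) (k := k2)
  rw [← hk3] at h3at
  refine (ced_cutpos_eq ?_ ?_ ?_).symm
  · omega
  · intro i hi
    by_contra hcc
    rw [Bool.not_eq_false] at hcc
    rcases (ced_altIsCut_iff _).mp hcc with hc | hc | hc
    · exact h1not i (by omega) hc
    · exact h2not i (by omega) hc
    · exact h3not i hi hc
  · rcases h3at with hb | hb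
    · exact Or.inl ((ced_altIsCut_iff _).mpr (Or.inr (Or.inr hb)))
    · rw [hb]
      rcases h2at with hb' | hb'
      · exact Or.inl ((ced_altIsCut_iff _).mpr (Or.inr (Or.inl hb')))
      · rw [hb']
        rcases h1at with hb'' | hb''
        · exact Or.inl ((ced_altIsCut_iff _).mpr (Or.inl hb''))
        · exact Or.inr hb''

-- ===== main glue =====

lemma ced_main (s : List Char) :
    (let cleaned := List.foldl cedStep s
        ["Related Links:".toList, "Online FDP |".toList, "Participate in Events".toList]
     if PySem.Chars.isIn "About Event".toList cleaned = true then
       (PySem.List.pyGet? (PySem.Chars.splitOn cleaned "About Event".toList) (-1)).getD []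
     else cleaned) = altGo s [] := by
  have hsepM : ("About Event".toList : List Char) ≠ [] := by decide
  have hbM : ∀ j < ("About Event".toList : List Char).length, 0 < j →
      ¬ ("About Event".toList : List Char).drop j <+: "About Event".toList := by decide
  dsimp only
  rw [ced_chain, ced_altGo_spec s.length s [] le_rfl]
  by_cases hin : PySem.Chars.isIn "About Event".toList (s.take (cutpos s)) = true
  · rw [if_pos hin, if_pos hin, ced_splitOn_last hsepM hbM, if_pos hin]
  · rw [if_neg hin, if_neg hin]
    simp

-- ===== VERDICT (by name: the statement is the Claim_ definition above) =====
theorem clean_event_description_spec : Claim_equal_clean_event_description := by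
  unfold Claim_equal_clean_event_description
  intro text _
  unfold Spec_clean_event_description clean_event_description clean_event_description_alt
  by_cases h : text.toList.isEmpty
  · simp [h]
  · rw [if_neg (by simpa using h), if_neg (by simpa using h)]
    have := ced_main text.toList
    simp only at this
    dsimp only
    rw [this]
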